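-- pv_equiv track=rewrite | github.com/powenn/Kata_solution | Python/Kata.py | decipher_this
-- ===== SOURCE A (Python) =====
-- def decipher_this(string):
--     string_list = []
--     for s in string.split(" "):
--         result = ""
--         letters = list(filter(lambda y: y.isalpha(), s))
--         if len(letters) > 1:
--             letters[0], letters[len(
--                 letters)-1] = letters[len(letters)-1], letters[0]
--         letters_part = "".join(list(filter(lambda y: y.isalpha(), letters)))
--         result += chr(int("".join(list(filter(lambda y: y.isnumeric(), s)))))+letters_part
--         string_list.append(result)
--     return " ".join(string_list)
-- ===== SOURCE B (Python) =====
-- def decipher_this(string):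
--     out = []
--     digits, first, middle, last = "", None, [], None
--     for c in string + " ":
--         if c == " ":
--             if last is None:
--                 letters = first if first is not None else ""
--             else:
--                 letters = last + "".join(middle) + first
--             out.append(chr(int(digits)) + letters)
--             digits, first, middle, last = "", None, [], None
--         elif c.isdigit():
--             digits += c
--         elif c.isalpha():
--             if first is None:
--                 first = c
--             elif last is None:
--                 last = c
--             else:
--                 middle.append(last)
--                 last = c
--     return " ".join(out)
-- ===== Notes on version B (the rewrite author's own statement) =====
-- stated objective: alternative
-- what changed: B drops split() and the three per-word filter scans entirely: it is a single state-machine pass over the whole string that per word accumulates the digit string and maintains the already-swapped letters incrementally (first letter, middle buffer, last letter), flushing a finished word at each space.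
import Mathlib
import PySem

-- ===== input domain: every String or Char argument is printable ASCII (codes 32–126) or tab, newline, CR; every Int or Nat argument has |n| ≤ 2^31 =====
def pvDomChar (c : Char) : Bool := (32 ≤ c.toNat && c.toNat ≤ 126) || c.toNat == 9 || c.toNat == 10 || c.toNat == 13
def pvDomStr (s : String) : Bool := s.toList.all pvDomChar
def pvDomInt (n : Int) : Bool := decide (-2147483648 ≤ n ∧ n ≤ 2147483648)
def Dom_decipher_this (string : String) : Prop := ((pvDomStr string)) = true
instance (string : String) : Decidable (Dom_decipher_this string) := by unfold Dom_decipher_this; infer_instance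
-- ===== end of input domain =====

-- B replaces A's split + three filter scans + index swap per word by a single state-machine
-- pass over the whole string (no split, no filters, no slicing): per word it accumulates the
-- digit string and maintains the swapped letters incrementally (first letter, middle buffer,
-- last letter), flushing a word at each space (objective: alternative decomposition, not speed).

-- ===== PORT A =====
-- per-word body of A's loop; y.isnumeric() ported as Chars.isdigit (exact on the ASCII domain)
def pvWordA (w : String) : String :=
  let letters := w.toList.filter PySem.Chars.isalpha
  let letters' :=
    if letters.length > 1 then
      (letters.set 0 (letters.getD (letters.length - 1) ' ')).set (letters.length - 1)
        (letters.getD 0 ' ')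
    else letters
  let letters_part := letters'.filter PySem.Chars.isalpha
  match PySem.Int.ofChars? (w.toList.filter PySem.Chars.isdigit) with
  | some n => String.ofList (Char.ofNat n.toNat :: letters_part)  -- chr(n): exact for valid codepoints (Pre_)
  | none => ""  -- int('') ValueError: excluded by Pre_

def decipher_this (string : String) : String :=
  PySem.Str.join " " (((PySem.Str.split? string " ").getD []).map pvWordA)

-- ===== PORT B =====
-- flush at a space: chr(int(digits)) + letters, letters rebuilt from (first, middle, last)
def pvFlushB (st : List Char × Option Char × List Char × Option Char) : List Char :=
  match st with
  | (digits, first, middle, lastC) =>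
    let letters : List Char :=
      match lastC with
      | none => (match first with | some f => [f] | none => [])
      | some l => l :: middle ++ (match first with | some f => [f] | none => [])
    match PySem.Int.ofChars? digits with
    | some n => Char.ofNat n.toNat :: letters  -- chr(n): exact for valid codepoints (Pre_)
    | none => []  -- int('') ValueError: excluded by Pre_

-- one step of B's scan over one character (the body of B's for-loop)
def pvStepB (st : List (List Char) × List Char × Option Char × List Char × Option Char)
    (c : Char) : List (List Char) × List Char × Option Char × List Char × Option Char :=
  match st with
  | (out, digits, first, middle, lastC) =>
    if c = ' ' then (out ++ [pvFlushB (digits, first, middle, lastC)], [], none, [], none)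
    else if PySem.Chars.isdigit c then (out, digits ++ [c], first, middle, lastC)
    else if PySem.Chars.isalpha c then
      match first, lastC with
      | none, l => (out, digits, some c, middle, l)
      | some f, none => (out, digits, some f, middle, some c)
      | some f, some l => (out, digits, some f, middle ++ [l], some c)
    else (out, digits, first, middle, lastC)

def decipher_this_alt (string : String) : String :=
  PySem.Str.join " "
    ((((string.toList ++ [' ']).foldl pvStepB ([], [], none, [], none)).1).map String.ofList)

-- ===== PRECONDITION & SPEC =====
-- Pre_ excludes exactly the inputs on which Python A raises: a word with no digit chars
-- (int('') ValueError) or whose digit string names a surrogate or a value above 0x10FFFF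
-- (chr ValueError; surrogates are returned by chr but are not representable as a Lean Char,
-- so they are excluded too).
def Pre_decipher_this (string : String) : Prop :=
  (((PySem.Str.split? string " ").getD []).all (fun w =>
    match PySem.Int.ofChars? (w.toList.filter PySem.Chars.isdigit) with
    | some n => decide ((n < 55296 ∨ 57343 < n) ∧ n ≤ 1114111)
    | none => false)) = true
instance (string : String) : Decidable (Pre_decipher_this string) := by
  unfold Pre_decipher_this; infer_instance
def pvWitness_decipher_this : String := "65abc 97xy"
def Spec_decipher_this (string : String) (out : String) : Prop := out = decipher_this_alt string
instance (string : String) (out : String) : Decidable (Spec_decipher_this string out) := by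
  unfold Spec_decipher_this; infer_instance

-- ===== CLAIM (what is proved, stated in full; the proofs are below) =====
def Claim_equal_decipher_this : Prop := ∀ (string : String), Dom_decipher_this string → Pre_decipher_this string → Spec_decipher_this string (decipher_this string)

-- ===== LEMMAS AND PROOFS =====

-- abstraction of B's per-word state after scanning a prefix p of the current word
def pvAbs (p : List Char) : List Char × Option Char × List Char × Option Char :=
  let L := p.filter PySem.Chars.isalpha
  (p.filter PySem.Chars.isdigit, L.head?, (L.drop 1).dropLast,
    if 2 ≤ L.length then L.getLast? else none)

theorem pv_digit_not_alpha (d : Char) (h : PySem.Chars.isdigit d = true) :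
    PySem.Chars.isalpha d = false := by
  simp only [PySem.Chars.isdigit, Char.le_def, Char.reduceVal, Bool.and_eq_true,
    decide_eq_true_eq, PySem.Chars.isalpha, PySem.Chars.isupper, PySem.Chars.islower,
    Bool.or_eq_false_iff, Bool.and_eq_false_imp, decide_eq_false_iff_not, UInt32.not_le] at *
  simp only [UInt32.le_iff_toNat_le, UInt32.lt_iff_toNat_lt,
    show (48:UInt32).toNat = 48 from rfl, show (57:UInt32).toNat = 57 from rfl,
    show (65:UInt32).toNat = 65 from rfl, show (90:UInt32).toNat = 90 from rfl,
    show (97:UInt32).toNat = 97 from rfl, show (122:UInt32).toNat = 122 from rfl] at *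
  omega

theorem pv_step_abs (out : List (List Char)) (p : List Char) (c : Char) (hc : c ≠ ' ') :
    pvStepB (out, pvAbs p) c = (out, pvAbs (p ++ [c])) := by
  simp only [pvStepB, pvAbs, List.filter_append, List.filter_cons, List.filter_nil, hc, if_false]
  by_cases hd : PySem.Chars.isdigit c
  · simp [hd, pv_digit_not_alpha c hd]
  · by_cases ha : PySem.Chars.isalpha c
    · simp only [hd, ha, if_true, if_false, Bool.false_eq_true, List.append_nil]
      match hLL : p.filter PySem.Chars.isalpha with
      | [] => simp
      | [a] => simp
      | a :: b :: K =>
        simp only [List.head?, List.cons_append]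
        rcases List.eq_nil_or_concat (b :: K) with h | ⟨M, l', hM⟩
        · simp at h
        · rw [show b :: (K ++ [c]) = (b :: K) ++ [c] from rfl, hM]
          simp only [List.concat_eq_append]
          have hg1 : (a :: (M ++ [l'])).getLast? = some l' := by
            rw [show a :: (M ++ [l']) = (a :: M) ++ [l'] from rfl, List.getLast?_concat]
          have hg2 : (a :: (M ++ [l', c])).getLast? = some c := by
            rw [show a :: (M ++ [l', c]) = (a :: (M ++ [l'])) ++ [c] from by simp,
              List.getLast?_concat]
          simp [hg1, hg2, List.dropLast_append_of_ne_nil]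
    · simp [hd, ha]

theorem pv_step_space (out : List (List Char)) (p : List Char) :
    pvStepB (out, pvAbs p) ' ' = (out ++ [pvFlushB (pvAbs p)], pvAbs []) := by
  simp [pvStepB, pvAbs]

theorem pv_modifyHead_id' {α : Type} (l : List α) : List.modifyHead (fun x => x) l = l := by
  cases l <;> simp

theorem pv_fold_words (l : List Char) : ∀ (p : List Char) (out : List (List Char)),
    (l ++ [' ']).foldl pvStepB (out, pvAbs p)
    = (out ++ ((l.splitOnP (· == ' ')).modifyHead (p ++ ·)).map (fun w => pvFlushB (pvAbs w)),
       pvAbs []) := by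
  induction l with
  | nil =>
    intro p out
    simp [pv_step_space, List.splitOnP_nil]
  | cons c rest ih =>
    intro p out
    by_cases hc : c = ' '
    · subst hc
      simp only [List.cons_append, List.foldl_cons, pv_step_space]
      rw [ih [] (out ++ [pvFlushB (pvAbs p)])]
      simp [List.splitOnP_cons, pv_modifyHead_id']
    · simp only [List.cons_append, List.foldl_cons, pv_step_abs out p c hc]
      rw [ih (p ++ [c]) out]
      simp only [List.splitOnP_cons, beq_iff_eq, hc, if_false, List.modifyHead_modifyHead]
      have hfe : (fun x : List Char => p ++ [c] ++ x) = ((fun x => p ++ x) ∘ List.cons c) := by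
        funext x; simp
      rw [hfe]

theorem pv_splitOn_go (fuel : Nat) : ∀ (l cur : List Char) (acc : List (List Char)),
    l.length ≤ fuel →
    PySem.Chars.splitOn.go [' '] fuel l cur acc
    = acc.reverse ++ (l.splitOnP (· == ' ')).modifyHead (cur.reverse ++ ·) := by
  induction fuel with
  | zero =>
    intro l cur acc h
    match l, h with
    | [], _ => simp [PySem.Chars.splitOn.go, List.splitOnP_nil]
  | succ fuel ih =>
    intro l cur acc h
    match l with
    | [] => simp [PySem.Chars.splitOn.go, List.splitOnP_nil]
    | c :: rest =>
      rw [PySem.Chars.splitOn.go]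
      by_cases hc : c = ' '
      · subst hc
        rw [if_pos (by simp [List.isPrefixOf])]
        simp only [List.length_cons] at h
        rw [ih _ _ _ (by simpa using Nat.le_of_succ_le_succ h)]
        simp [List.splitOnP_cons, pv_modifyHead_id']
      · rw [if_neg (by simp [List.isPrefixOf]; exact fun h' => hc h'.symm)]
        simp only [List.length_cons] at h
        rw [ih _ _ _ (Nat.le_of_succ_le_succ h)]
        simp only [List.splitOnP_cons, beq_iff_eq, hc, if_false, List.modifyHead_modifyHead]
        congr 1
        congr 1
        funext x
        simp

theorem pv_splitOn_eq (l : List Char) :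
    PySem.Chars.splitOn l [' '] = l.splitOnP (· == ' ') := by
  rw [PySem.Chars.splitOn, pv_splitOn_go _ _ _ _ (Nat.le_succ _)]
  simp [pv_modifyHead_id']

theorem pv_word_eq (w : List Char) :
    pvWordA (String.ofList w) = String.ofList (pvFlushB (pvAbs w)) := by
  unfold pvWordA pvFlushB pvAbs
  simp only [String.toList_ofList]
  have hall : ∀ c ∈ w.filter PySem.Chars.isalpha, PySem.Chars.isalpha c = true :=
    fun c hc => List.of_mem_filter hc
  cases hofc : PySem.Int.ofChars? (w.filter PySem.Chars.isdigit) with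
  | none =>
    match hLL : w.filter PySem.Chars.isalpha with
    | [] => simp
    | [a] => simp
    | a :: b :: K => simp
  | some n =>
    match hLL : w.filter PySem.Chars.isalpha with
    | [] => simp
    | [a] =>
      rw [hLL] at hall
      simp [hall a (by simp)]
    | a :: b :: K =>
      rcases List.eq_nil_or_concat (b :: K) with h | ⟨M, l', hM⟩
      · simp at h
      · rw [hLL] at hall
        rw [hM] at hall ⊢
        simp only [List.concat_eq_append, List.cons_append]
        rw [if_pos (by simp)]
        have hswap : ((a :: (M ++ [l'])).set 0
              ((a :: (M ++ [l'])).getD ((a :: (M ++ [l'])).length - 1) ' ')).set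
              ((a :: (M ++ [l'])).length - 1) ((a :: (M ++ [l'])).getD 0 ' ')
            = l' :: M ++ [a] := by
          have h1 : (a :: (M ++ [l'])).getD ((a :: (M ++ [l'])).length - 1) ' ' = l' := by
            simp [List.getD_eq_getElem?_getD]
          have h2 : (a :: (M ++ [l'])).getD 0 ' ' = a := by simp
          rw [h1, h2]
          have : (a :: (M ++ [l'])).length - 1 = M.length + 1 := by simp
          rw [this]
          simp only [List.set_cons_zero, List.set_cons_succ]
          congr 1
          rw [List.set_append_right _ _ (le_refl _)]
          simp
        rw [hswap]
        have hmem : ∀ c ∈ l' :: M ++ [a], PySem.Chars.isalpha c = true := by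
          intro c hc
          apply hall
          simp only [List.cons_append, List.mem_cons, List.mem_append,
            List.concat_eq_append] at hc ⊢
          tauto
        rw [List.filter_eq_self.mpr hmem]
        rw [if_pos (by simp)]
        rw [show a :: (M ++ [l']) = (a :: M) ++ [l'] from rfl, List.getLast?_concat]
        simp

-- ===== VERDICT (by name: the statement is the Claim_ definition above) =====
theorem decipher_this_spec : Claim_equal_decipher_this := by
  intro s _ _
  unfold Spec_decipher_this decipher_this decipher_this_alt
  have hsplit : (PySem.Str.split? s " ").getD []
      = (s.toList.splitOnP (· == ' ')).map String.ofList := by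
    simp [PySem.Str.split?, PySem.Chars.split?, pv_splitOn_eq,
      show (" " : String).toList = [' '] from rfl]
  have hfold := pv_fold_words s.toList [] []
  simp only [List.nil_append] at hfold
  rw [hsplit, show (([], [], none, [], none) :
      List (List Char) × List Char × Option Char × List Char × Option Char)
      = (([], pvAbs []) : _) from rfl, hfold]
  simp only [pv_modifyHead_id', List.map_map]
  congr 1
  apply List.map_congr_left
  intro w _
  exact pv_word_eq w
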